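-- pv_equiv track=rewrite | github.com/farbodfld/Genetic-and-Simiulated | main.py | count_incorrect_caluses
-- ===== SOURCE A (Python) =====
-- from copy import deepcopy
--
-- def count_incorrect_caluses(input, state):
--     clauses = deepcopy(input)
--     counter = len(clauses)
--     for l in range(len(state)):
--         i = 0
--         while i < len(clauses):
--             if (l in clauses[i] and state[l]) or (-l in clauses[i] and not state[l]):
--                 clauses.remove(clauses[i])
--             else:
--                 i = i + 1
--     return len(clauses)
-- ===== SOURCE B (Python) =====
-- def count_incorrect_caluses(input, state):
--     # literal x currently satisfies a clause iff x is in this set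
--     sat = {l if state[l] else -l for l in range(len(state))}
--     return sum(1 for clause in input if not (sat & set(clause)))
-- ===== Notes on version B (the rewrite author's own statement) =====
-- stated objective: simpler
-- what changed: B precomputes once the set of literals made true by the assignment and then counts, in one pass, the clauses disjoint from it, instead of A's per-variable rescans of a deep-copied clause list with in-place removals.
import Mathlib
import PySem

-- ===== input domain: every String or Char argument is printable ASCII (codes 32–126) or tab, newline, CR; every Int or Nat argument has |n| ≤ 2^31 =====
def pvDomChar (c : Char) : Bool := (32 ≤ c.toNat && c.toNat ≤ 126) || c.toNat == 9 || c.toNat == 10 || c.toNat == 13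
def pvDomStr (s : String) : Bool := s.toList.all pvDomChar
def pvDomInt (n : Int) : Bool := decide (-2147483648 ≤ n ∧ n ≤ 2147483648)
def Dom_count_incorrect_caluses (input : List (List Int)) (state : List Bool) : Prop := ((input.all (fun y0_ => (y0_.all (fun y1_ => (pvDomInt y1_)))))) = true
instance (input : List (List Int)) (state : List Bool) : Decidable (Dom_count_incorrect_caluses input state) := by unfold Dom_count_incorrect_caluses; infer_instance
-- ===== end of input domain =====

-- B builds the set of satisfying literals once and counts clauses disjoint from it (simpler one-pass
-- re-implementation); A does not observably mutate its arguments (it works on a deepcopy).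

-- ===== PORT A =====
-- the if-condition of A's inner while loop
def pvSat (l : Nat) (sl : Bool) (c : List Int) : Bool :=
  (c.contains (l : Int) && sl) || (c.contains (-(l : Int)) && !sl)

-- A's inner 'while i < len(clauses)' loop; 'clauses.remove(clauses[i])' removes the first clause
-- equal to clauses[i], i.e. List.erase (the element is present, so Python's ValueError cannot occur)
def pvInner (l : Nat) (sl : Bool) (cs : List (List Int)) (i : Nat) : List (List Int) :=
  if h : i < cs.length then
    if pvSat l sl cs[i] then
      pvInner l sl (cs.erase cs[i]) i
    else
      pvInner l sl cs (i + 1)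
  else cs
termination_by cs.length - i
decreasing_by
  · have := List.length_erase_of_mem (List.getElem_mem h) (l := cs)
    omega
  · omega

def count_incorrect_caluses (input : List (List Int)) (state : List Bool) : Int :=
  -- clauses = deepcopy(input); counter = len(clauses) is dead code
  let clauses := input
  let clauses := (List.range state.length).foldl
    (fun cs l => pvInner l (state.getD l false) cs 0) clauses
  (clauses.length : Int)

-- ===== PORT B =====
-- {l if state[l] else -l for l in range(len(state))}
def pvSatSet (state : List Bool) : PySem.Set Int :=
  PySem.Set.ofList ((List.range state.length).map
    (fun l => if state.getD l false then (l : Int) else -(l : Int)))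

def count_incorrect_caluses_alt (input : List (List Int)) (state : List Bool) : Int :=
  let sat := pvSatSet state
  -- sum(1 for clause in input if not (sat & set(clause)))
  input.foldl
    (fun acc clause => if PySem.Set.inter sat (PySem.Set.ofList clause) = [] then acc + 1 else acc)
    (0 : Int)

-- ===== PRECONDITION & SPEC =====
def Spec_count_incorrect_caluses (input : List (List Int)) (state : List Bool) (out : Int) : Prop := out = count_incorrect_caluses_alt input state
instance (input : List (List Int)) (state : List Bool) (out : Int) : Decidable (Spec_count_incorrect_caluses input state out) := by unfold Spec_count_incorrect_caluses; infer_instance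

-- ===== CLAIM (what is proved, stated in full; the proofs are below) =====
def Claim_equal_count_incorrect_caluses : Prop := ∀ (input : List (List Int)) (state : List Bool), Dom_count_incorrect_caluses input state → Spec_count_incorrect_caluses input state (count_incorrect_caluses input state)

-- ===== LEMMAS AND PROOFS =====

-- A's inner loop, started after a prefix of non-satisfying clauses, filters the rest
lemma pvInner_eq (l : Nat) (sl : Bool) :
    ∀ (rest pre : List (List Int)), (∀ c ∈ pre, pvSat l sl c = false) →
      pvInner l sl (pre ++ rest) pre.length = pre ++ rest.filter (fun c => !pvSat l sl c) := by
  intro rest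
  induction rest with
  | nil =>
    intro pre _
    rw [pvInner]
    simp
  | cons c rest ih =>
    intro pre hpre
    rw [pvInner]
    have hlt : pre.length < (pre ++ c :: rest).length := by simp
    have hget : (pre ++ c :: rest)[pre.length]'hlt = c := by
      rw [List.getElem_append_right (by omega)]
      simp
    rw [dif_pos hlt, hget]
    by_cases hc : pvSat l sl c
    · have hnotmem : c ∉ pre := fun hm => by simp [hpre c hm] at hc
      rw [if_pos hc, List.erase_append_right _ hnotmem, List.erase_cons_head]
      rw [ih pre hpre]
      simp [hc]
    · rw [if_neg hc]
      have : pre ++ c :: rest = (pre ++ [c]) ++ rest := by simp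
      have hlen : pre.length + 1 = (pre ++ [c]).length := by simp
      rw [this, hlen, ih (pre ++ [c]) (by
        intro d hd
        rcases List.mem_append.1 hd with h | h
        · exact hpre d h
        · simp at h; subst h; simpa using hc)]
      simp [hc]

lemma pvInner_zero (l : Nat) (sl : Bool) (cs : List (List Int)) :
    pvInner l sl cs 0 = cs.filter (fun c => !pvSat l sl c) := by
  simpa using pvInner_eq l sl cs [] (by simp)

-- folding filters is filtering by the conjunction
lemma foldl_filter_all {α β : Type} (q : β → α → Bool) :
    ∀ (ls : List β) (xs : List α),
      ls.foldl (fun cs l => cs.filter (q l)) xs = xs.filter (fun c => ls.all (fun l => q l c)) := by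
  intro ls
  induction ls with
  | nil => intro xs; simp
  | cons l ls ih =>
    intro xs
    simp only [List.foldl_cons, ih, List.filter_filter]
    apply List.filter_congr
    intro c _
    simp [List.all_cons, Bool.and_comm]

-- pointwise: a clause survives every variable pass iff it is disjoint from B's satisfying-literal set
lemma pointwise (state : List Bool) (c : List Int) :
    ((List.range state.length).all (fun l => !pvSat l (state.getD l false) c)) =
      decide (PySem.Set.inter (pvSatSet state) (PySem.Set.ofList c) = []) := by
  rw [Bool.eq_iff_iff]
  simp only [List.all_eq_true, List.mem_range, Bool.not_eq_eq_eq_not, Bool.not_true,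
    decide_eq_true_eq, pvSat, pvSatSet, PySem.Set.inter, List.filter_eq_nil_iff,
    PySem.Set.mem_ofList, List.mem_map, Bool.or_eq_false_iff, Bool.and_eq_false_iff,
    PySem.Set.contains_eq_listContains, List.contains_eq_mem,
    decide_eq_false_iff_not, List.getD]
  constructor
  · rintro h x ⟨l, hl, rfl⟩
    rcases h l hl with ⟨h1, h2⟩
    by_cases hs : state[l]?.getD false = true
    · simp only [hs, if_true]
      rcases h1 with h1 | h1
      · simpa using h1
      · simp [hs] at h1
    · simp only [Bool.not_eq_true] at hs
      simp only [hs, Bool.false_eq_true, if_false]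
      rcases h2 with h2 | h2
      · simpa using h2
      · simp [hs] at h2
  · intro h l hl
    have := h _ ⟨l, hl, rfl⟩
    by_cases hs : state[l]?.getD false = true
    · simp only [hs, if_true] at this
      refine ⟨Or.inl (by simpa using this), Or.inr (by simp [hs])⟩
    · simp only [Bool.not_eq_true] at hs
      simp only [hs, Bool.false_eq_true, if_false] at this
      refine ⟨Or.inr hs, Or.inl (by simpa using this)⟩

-- ===== VERDICT (by name: the statement is the Claim_ definition above) =====
theorem count_incorrect_caluses_spec : Claim_equal_count_incorrect_caluses := by
  intro input state _
  unfold Spec_count_incorrect_caluses count_incorrect_caluses count_incorrect_caluses_alt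
  show (((List.range state.length).foldl
      (fun cs l => pvInner l (state.getD l false) cs 0) input).length : Int)
    = input.foldl (fun acc clause =>
        if PySem.Set.inter (pvSatSet state) (PySem.Set.ofList clause) = [] then acc + 1 else acc) 0
  have hA : (List.range state.length).foldl
      (fun cs l => pvInner l (state.getD l false) cs 0) input
      = input.filter (fun c => (List.range state.length).all
          (fun l => !pvSat l (state.getD l false) c)) := by
    rw [show (fun (cs : List (List Int)) (l : Nat) => pvInner l (state.getD l false) cs 0)
        = fun cs l => cs.filter (fun c => !pvSat l (state.getD l false) c) from
      funext fun cs => funext fun l => pvInner_zero l (state.getD l false) cs]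
    exact foldl_filter_all _ _ input
  rw [hA]
  rw [PySem.List.foldl_ite_add_one
    (p := fun clause => PySem.Set.inter (pvSatSet state) (PySem.Set.ofList clause) = [])]
  rw [← List.countP_eq_length_filter, zero_add]
  norm_cast
  exact List.countP_congr (fun c _ => by rw [pointwise state c])
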